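-- pv_equiv track=rewrite | github.com/honzascholtz/Qubespec | QubeSpec/Fitting/fits_r.py | parse_line_components
-- ===== SOURCE A (Python) =====
-- from typing import Dict, List, Tuple, Optional, Union
--
-- def parse_line_components(line_names: List[str],
--                         components: List[int]) -> Dict[int, List[str]]:
--     """
--     Parse line names and components into groups.
--
--     Parameters:
--     -----------
--     line_names : list
--         List of emission line names
--     components : list
--         List of component numbers (same length as line_names)
--
--     Returns:
--     --------
--     dict
--         Dictionary mapping component numbers to lists of line names
--     """
--     if len(line_names) != len(components):
--         raise ValueError("line_names and components must have the same length")
--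
--     component_groups = {}
--     for line_name, comp in zip(line_names, components):
--         if comp not in component_groups:
--             component_groups[comp] = []
--         component_groups[comp].append(line_name)
--
--     return component_groups
-- ===== SOURCE B (Python) =====
-- def parse_line_components(line_names, components):
--     if len(line_names) != len(components):
--         raise ValueError("line_names and components must have the same length")
--     order = list(dict.fromkeys(components))
--     return {c: [n for n, k in zip(line_names, components) if k == c] for c in order}
-- ===== Notes on version B (the rewrite author's own statement) =====
-- stated objective: alternative
-- what changed: Replaced the single-pass accumulating dict with a two-phase strategy: dedupe the component numbers in first-appearance order, then build each group by filtering the zipped pairs per component.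
import Mathlib
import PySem

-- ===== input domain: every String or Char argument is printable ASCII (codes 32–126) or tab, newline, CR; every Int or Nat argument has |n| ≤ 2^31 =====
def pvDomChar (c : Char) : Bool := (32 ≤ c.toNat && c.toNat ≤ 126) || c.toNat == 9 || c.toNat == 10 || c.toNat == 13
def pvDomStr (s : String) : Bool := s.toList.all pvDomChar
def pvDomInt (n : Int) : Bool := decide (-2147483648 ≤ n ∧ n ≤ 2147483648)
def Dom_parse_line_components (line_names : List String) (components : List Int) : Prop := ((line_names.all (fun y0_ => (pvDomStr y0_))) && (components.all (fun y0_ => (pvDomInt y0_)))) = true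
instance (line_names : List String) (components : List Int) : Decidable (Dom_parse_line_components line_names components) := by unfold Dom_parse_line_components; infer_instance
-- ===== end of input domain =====

-- B replaces A's one-pass accumulating dict with dedupe-then-filter-per-component (objective: alternative, same result; not claimed faster).

-- ===== PORT A =====
-- loop body of A: if comp not in dict then dict[comp] = []; dict[comp].append(line_name)
def pvStepA (component_groups : PySem.Dict Int (List String)) (p : String × Int) :
    PySem.Dict Int (List String) :=
  let component_groups :=
    if component_groups.contains p.2 then component_groups
    else component_groups.insert p.2 []
  component_groups.modify p.2 [] (fun l => l ++ [p.1])

def parse_line_components (line_names : List String) (components : List Int) :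
    List (Int × List String) :=
  let component_groups := (line_names.zip components).foldl pvStepA PySem.Dict.empty
  component_groups.items

-- ===== PORT B =====
def parse_line_components_alt (line_names : List String) (components : List Int) :
    List (Int × List String) :=
  let order := PySem.List.dedup components
  order.map (fun c => (c, ((line_names.zip components).filter (fun p => p.2 == c)).map (·.1)))

-- ===== PRECONDITION & SPEC =====
-- Pre_ excludes exactly the inputs of unequal lengths, on which A raises ValueError.
def Pre_parse_line_components (line_names : List String) (components : List Int) : Prop :=
  line_names.length = components.length
instance (line_names : List String) (components : List Int) : Decidable (Pre_parse_line_components line_names components) := by unfold Pre_parse_line_components; infer_instance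

def pvWitness_parse_line_components : List String × List Int := (["Ha", "Hb", "OIII"], [1, 2, 1])

def Spec_parse_line_components (line_names : List String) (components : List Int) (out : List (Int × List String)) : Prop := out = parse_line_components_alt line_names components
instance (line_names : List String) (components : List Int) (out : List (Int × List String)) : Decidable (Spec_parse_line_components line_names components out) := by unfold Spec_parse_line_components; infer_instance

-- ===== CLAIM (what is proved, stated in full; the proofs are below) =====
def Claim_equal_parse_line_components : Prop := ∀ (line_names : List String) (components : List Int), Dom_parse_line_components line_names components → Pre_parse_line_components line_names components → Spec_parse_line_components line_names components (parse_line_components line_names components)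

-- ===== LEMMAS AND PROOFS =====
lemma pvStepA_eq_modify (d : PySem.Dict Int (List String)) (p : String × Int) :
    pvStepA d p = d.modify p.2 [] (fun l => l ++ [p.1]) := by
  unfold pvStepA
  by_cases h : d.contains p.2
  · simp [h]
  · have h' : d.contains p.2 = false := by simpa using h
    simp [PySem.Dict.modify, PySem.Dict.getD_insert_self, PySem.Dict.insert_insert_self,
          PySem.Dict.getD_of_not_contains d _ h', h']

lemma pvFoldA_eq (pairs : List (String × Int)) (d : PySem.Dict Int (List String)) :
    pairs.foldl pvStepA d = pairs.foldl (fun d p => d.modify p.2 [] (fun l => l ++ [p.1])) d := by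
  induction pairs generalizing d with
  | nil => rfl
  | cons p rest ih => simp [List.foldl_cons, pvStepA_eq_modify, ih]

-- ===== VERDICT (by name: the statement is the Claim_ definition above) =====
theorem parse_line_components_spec : Claim_equal_parse_line_components := by
  intro line_names components _hdom h
  unfold Spec_parse_line_components parse_line_components parse_line_components_alt
  set pairs := line_names.zip components with hp
  rw [pvFoldA_eq]
  have hfm : pairs.foldl (fun d p => d.modify p.2 [] fun l => l ++ [p.1]) PySem.Dict.empty
      = (pairs.map (fun p => (p.2, p.1))).foldl
          (fun d (q : Int × String) => d.modify q.1 [] fun l => l ++ [q.2]) PySem.Dict.empty := by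
    rw [List.foldl_map]
  rw [hfm]
  set l := pairs.map (fun p => (p.2, p.1)) with hl
  set D := l.foldl (fun d (q : Int × String) => d.modify q.1 [] fun l => l ++ [q.2]) PySem.Dict.empty with hD
  have hnodup : D.keys.Nodup := by
    rw [hD]
    exact PySem.Dict.nodup_keys_foldl_modify_key l (fun q => q.1)
      [] (fun d q v => v ++ [q.2]) PySem.Dict.empty (by simp)
  have hsnd : l.map (fun q : Int × String => q.1) = components := by
    rw [hl, List.map_map, hp]
    have : ((fun q : Int × String => q.1) ∘ (fun p : String × Int => (p.2, p.1)))
        = (Prod.snd : String × Int → Int) := rfl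
    rw [this, List.map_snd_zip (le_of_eq h.symm)]
  have hkeys : D.keys = PySem.Set.ofList components := by
    rw [hD]
    rw [PySem.Dict.keys_foldl_modify_key l (fun q => q.1) [] (fun d q v => v ++ [q.2])]
    simp [PySem.Set.update_nil_left, hsnd, PySem.Dict.keys_empty]
  rw [PySem.Dict.items_eq_map_keys D hnodup [], hkeys]
  simp only [PySem.List.dedup_eq_ofList]
  apply List.map_congr_left
  intro c _hc
  congr 1
  rw [hD, PySem.Dict.getD_foldl_modify_append l PySem.Dict.empty c]
  rw [hl, List.filter_map, List.map_map]
  rfl
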